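-- pv_equiv track=rewrite | github.com/Bokha/AdventOfCode | day10_2020/run.py | getting_the_chain
-- ===== SOURCE A (Python) =====
-- def getting_the_chain(lista):
--     segmente = [0,0,0,0,0]
--     einsen = 0
--     for x in lista:
--         if x==1:
--             einsen +=1
--         if x==3:
--             segmente[einsen] +=1
--             einsen = 0
--     return segmente
-- ===== SOURCE B (Python) =====
-- def getting_the_chain(lista):
--     segmente = [0, 0, 0, 0, 0]
--     start = 0
--     for i, x in enumerate(lista):
--         if x == 3:
--             segmente[lista[start:i].count(1)] += 1
--             start = i + 1
--     return segmente
-- ===== Notes on version B (the rewrite author's own statement) =====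
-- stated objective: alternative
-- what changed: B replaces A's running 1-counter with segment bookkeeping: it tracks the start index of the current segment and, at each 3, counts the 1s in the slice lista[start:i] directly, instead of maintaining and resetting an accumulator.
import Mathlib
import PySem

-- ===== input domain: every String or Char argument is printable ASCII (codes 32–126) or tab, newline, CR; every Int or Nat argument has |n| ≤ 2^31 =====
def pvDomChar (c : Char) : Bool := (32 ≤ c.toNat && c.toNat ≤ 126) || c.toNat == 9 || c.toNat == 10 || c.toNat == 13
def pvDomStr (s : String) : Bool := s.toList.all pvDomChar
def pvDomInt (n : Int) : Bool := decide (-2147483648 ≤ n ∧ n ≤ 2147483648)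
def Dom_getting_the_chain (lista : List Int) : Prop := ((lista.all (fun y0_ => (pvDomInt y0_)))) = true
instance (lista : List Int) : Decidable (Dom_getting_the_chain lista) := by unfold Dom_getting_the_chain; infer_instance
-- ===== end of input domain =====

-- B replaces A's running 1-counter by segment bookkeeping (start index + a slice count at each 3);
-- same O(n)-ish cost, different decomposition ('alternative').

-- ===== PORT A =====
-- einsen only ever counts up from 0, so it is kept as a Nat.
-- segmente[einsen] += 1: under Pre_ the index is in range (out of range raises IndexError in Python,
-- excluded by Pre_).
def gtcA_loop : List Int → List Int → Nat → List Int
  | [], seg, _ => seg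
  | x :: xs, seg, einsen =>
    let einsen' := if x = 1 then einsen + 1 else einsen
    if x = 3 then gtcA_loop xs (seg.set einsen' (seg.getD einsen' 0 + 1)) 0
    else gtcA_loop xs seg einsen'

def getting_the_chain (lista : List Int) : List Int :=
  gtcA_loop lista [0, 0, 0, 0, 0] 0

-- ===== PORT B =====
-- for i, x in enumerate(lista): carried index i; slice lista[start:i] via PySem.List.slice.
def gtcB_loop (lista : List Int) : List Int → Nat → List Int → Nat → List Int
  | [], _, seg, _ => seg
  | x :: xs, i, seg, start =>
    if x = 3 then
      let c := (PySem.List.slice lista (some (start : Int)) (some (i : Int))).count 1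
      gtcB_loop lista xs (i + 1) (seg.set c (seg.getD c 0 + 1)) (i + 1)
    else gtcB_loop lista xs (i + 1) seg start

def getting_the_chain_alt (lista : List Int) : List Int :=
  gtcB_loop lista lista 0 [0, 0, 0, 0, 0] 0

-- ===== PRECONDITION & SPEC =====
-- Pre_ excludes exactly the inputs on which Python A raises IndexError: some 3 in the list is
-- preceded (since the previous 3) by five or more 1s, so segmente[einsen] is out of range.
def Pre_getting_the_chain (lista : List Int) : Prop :=
  ∀ j, j < lista.length → lista.getD j 0 = 3 →
    ((lista.take j).reverse.takeWhile (· ≠ 3)).count 1 ≤ 4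
instance (lista : List Int) : Decidable (Pre_getting_the_chain lista) := by
  unfold Pre_getting_the_chain; infer_instance

def pvWitness_getting_the_chain : List Int := [1, 1, 3, 1, 3]

def Spec_getting_the_chain (lista : List Int) (out : List Int) : Prop := out = getting_the_chain_alt lista
instance (lista : List Int) (out : List Int) : Decidable (Spec_getting_the_chain lista out) := by unfold Spec_getting_the_chain; infer_instance

-- ===== CLAIM (what is proved, stated in full; the proofs are below) =====
def Claim_equal_getting_the_chain : Prop := ∀ (lista : List Int), Dom_getting_the_chain lista → Pre_getting_the_chain lista → Spec_getting_the_chain lista (getting_the_chain lista)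

-- ===== LEMMAS AND PROOFS =====

-- Invariant: A's counter einsen equals the count of 1s in lista[start:i].
lemma gtc_loop_eq (lista : List Int) :
    ∀ (xs : List Int) (i start : Nat) (seg : List Int),
      lista.drop i = xs → start ≤ i →
      gtcB_loop lista xs i seg start
        = gtcA_loop xs seg (((lista.drop start).take (i - start)).count 1) := by
  intro xs
  induction xs with
  | nil => intro i start seg _ _; rfl
  | cons x xs ih =>
    intro i start seg hdrop hle
    have hi : i < lista.length := by
      by_contra h
      have : lista.drop i = [] := List.drop_eq_nil_of_le (by omega)
      simp [this] at hdrop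
    have hx : lista[i]? = some x := by
      have h0 : (lista.drop i)[0]? = lista[i]? := by
        rw [List.getElem?_drop]; norm_num
      rw [← h0, hdrop]; rfl
    have hdrop' : lista.drop (i + 1) = xs := by
      have : lista.drop (i + 1) = (lista.drop i).drop 1 := by
        rw [List.drop_drop]
      rw [this, hdrop]; rfl
    have hseg : (lista.drop start).take (i + 1 - start)
        = (lista.drop start).take (i - start) ++ [x] := by
      have h1 : i + 1 - start = (i - start) + 1 := by omega
      rw [h1, List.take_add_one]
      have h2 : (lista.drop start)[i - start]? = some x := by
        rw [List.getElem?_drop]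
        have : start + (i - start) = i := by omega
        rw [this, hx]
      rw [h2]; rfl
    by_cases h3 : x = 3
    · subst h3
      simp only [gtcA_loop, gtcB_loop, if_neg (by decide : ¬ (3 : Int) = 1)]
      rw [PySem.List.slice_natCast]
      rw [ih (i + 1) (i + 1) _ hdrop' (le_refl _)]
      simp
    · simp only [gtcA_loop, gtcB_loop, if_neg h3]
      rw [ih (i + 1) start _ hdrop' (by omega)]
      rw [hseg]
      by_cases h1 : x = 1
      · subst h1; simp [List.count_append]
      · simp [List.count_append, h1]

-- ===== VERDICT (by name: the statement is the Claim_ definition above) =====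
theorem getting_the_chain_spec : Claim_equal_getting_the_chain := by
  intro lista _ _
  unfold Spec_getting_the_chain getting_the_chain getting_the_chain_alt
  rw [gtc_loop_eq lista lista 0 0 _ rfl (le_refl _)]
  rfl
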